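-- pv_equiv track=rewrite | github.com/sangminsang/mahjong_yolo_project | apis/discard/logic.py | calculate_kokushi_shanten
-- ===== SOURCE A (Python) =====
-- def calculate_kokushi_shanten(hand):
--     """정확한 국사무쌍 샤텐 계산"""
--     required = {'1m','9m','1p','9p','1s','9s','1z','2z','3z','4z','5z','6z','7z'}
--     unique = set()
--     has_pair = False
--
--     for tile in hand:
--         if tile in required:
--             unique.add(tile)
--             if hand.count(tile) >= 2:
--                 has_pair = True
--
--     missing = 13 - len(unique)
--     return missing - (1 if has_pair else 0)
-- ===== SOURCE B (Python) =====
-- def calculate_kokushi_shanten(hand):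
--     """Kokushi shanten by traversing the 13 required tiles (not the hand):
--     one hand.count per required tile; no set is built at all."""
--     shanten = 13
--     pair_bonus = 0
--     for t in ('1m', '9m', '1p', '9p', '1s', '9s',
--               '1z', '2z', '3z', '4z', '5z', '6z', '7z'):
--         c = hand.count(t)
--         if c >= 1:
--             shanten -= 1
--         if c >= 2:
--             pair_bonus = 1
--     return shanten - pair_bonus
-- ===== Notes on version B (the rewrite author's own statement) =====
-- stated objective: alternative
-- what changed: B inverts the traversal: instead of scanning the hand while maintaining a set of seen required tiles (with an inner hand.count per matching tile), it iterates over the fixed 13 required tiles, takes one hand.count per tile, and decrements a shanten counter per present tile; no set is constructed.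
import Mathlib
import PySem

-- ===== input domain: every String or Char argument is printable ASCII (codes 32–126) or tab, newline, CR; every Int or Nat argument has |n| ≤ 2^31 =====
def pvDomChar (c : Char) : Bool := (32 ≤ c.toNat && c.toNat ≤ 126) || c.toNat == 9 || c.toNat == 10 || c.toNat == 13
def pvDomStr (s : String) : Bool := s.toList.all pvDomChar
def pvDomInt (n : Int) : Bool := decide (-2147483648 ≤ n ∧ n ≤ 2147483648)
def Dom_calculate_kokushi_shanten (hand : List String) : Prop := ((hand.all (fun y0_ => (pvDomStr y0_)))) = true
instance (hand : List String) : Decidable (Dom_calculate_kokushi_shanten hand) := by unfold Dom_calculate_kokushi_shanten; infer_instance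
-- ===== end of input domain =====

-- B inverts the traversal: it loops over the 13 required tiles counting each in the hand,
-- instead of scanning the hand with a seen-set and an inner count — alternative decomposition.


def kokushiRequired : PySem.Set String :=
  PySem.Set.ofList ["1m","9m","1p","9p","1s","9s","1z","2z","3z","4z","5z","6z","7z"]

-- ===== PORT A =====
def calculate_kokushi_shanten (hand : List String) : Int :=
  let st := hand.foldl
    (fun (st : PySem.Set String × Bool) tile =>
      if PySem.Set.contains kokushiRequired tile then
        (PySem.Set.add st.1 tile, st.2 || decide (2 ≤ PySem.List.count hand tile))
      else st)
    (PySem.Set.empty, false)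
  let missing : Int := 13 - PySem.Set.len st.1
  missing - (if st.2 then 1 else 0)

-- ===== PORT B =====
def kokushiRequiredTuple : List String :=
  ["1m","9m","1p","9p","1s","9s","1z","2z","3z","4z","5z","6z","7z"]

def calculate_kokushi_shanten_alt (hand : List String) : Int :=
  let st := kokushiRequiredTuple.foldl
    (fun (st : Int × Int) t =>
      let c := PySem.List.count hand t
      let shanten := if 1 ≤ c then st.1 - 1 else st.1
      let pair_bonus := if 2 ≤ c then (1 : Int) else st.2
      (shanten, pair_bonus))
    (13, 0)
  st.1 - st.2

-- ===== PRECONDITION & SPEC =====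
def Spec_calculate_kokushi_shanten (hand : List String) (out : Int) : Prop := out = calculate_kokushi_shanten_alt hand
instance (hand : List String) (out : Int) : Decidable (Spec_calculate_kokushi_shanten hand out) := by unfold Spec_calculate_kokushi_shanten; infer_instance

-- ===== CLAIM (what is proved, stated in full; the proofs are below) =====
def Claim_equal_calculate_kokushi_shanten : Prop := ∀ (hand : List String), Dom_calculate_kokushi_shanten hand → Spec_calculate_kokushi_shanten hand (calculate_kokushi_shanten hand)

-- ===== LEMMAS AND PROOFS =====

-- A-side: the or-accumulating fold is List.any
theorem foldl_or_eq_any (l : List String) (p : String → Bool) (b : Bool) :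
    l.foldl (fun acc t => acc || p t) b = (b || l.any p) := by
  induction l generalizing b with
  | nil => simp
  | cons x xs ih => simp [ih, Bool.or_assoc]

-- B-side: characterisation of B's fold (shanten decrements count presence; pair_bonus latches)
theorem alt_fold_char (hand : List String) (l : List String) (s p : Int) :
    l.foldl
      (fun (st : Int × Int) t =>
        let c := PySem.List.count hand t
        let shanten := if 1 ≤ c then st.1 - 1 else st.1
        let pair_bonus := if 2 ≤ c then (1 : Int) else st.2
        (shanten, pair_bonus)) (s, p)
    = (s - (l.countP (fun t => decide (1 ≤ PySem.List.count hand t)) : Int),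
       if l.any (fun t => decide (2 ≤ PySem.List.count hand t)) then 1 else p) := by
  induction l generalizing s p with
  | nil => simp
  | cons x xs ih =>
    simp only [List.foldl_cons, ih, List.countP_cons, List.any_cons]
    rw [Prod.mk.injEq]
    constructor
    · split_ifs <;> simp_all <;> omega
    · simp only [decide_eq_true_iff, List.any_eq_true, Bool.or_eq_true]
      by_cases h1 : ∃ y ∈ xs, 2 ≤ List.count y hand <;>
        by_cases h2 : 2 ≤ List.count x hand <;>
        simp [PySem.List.count_eq, h1, h2]

-- membership in the required set equals membership in the tuple
theorem contains_required_iff (t : String) :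
    PySem.Set.contains kokushiRequired t = true ↔ t ∈ kokushiRequiredTuple := by
  rw [PySem.Set.contains_iff, kokushiRequired, PySem.Set.mem_ofList]; rfl

-- the distinct picked tiles are as many as the required tiles present in the hand
theorem len_ofList_picks (hand : List String) :
    (PySem.Set.ofList (hand.filter (fun t => PySem.Set.contains kokushiRequired t))).length
      = kokushiRequiredTuple.countP (fun t => decide (1 ≤ PySem.List.count hand t)) := by
  set picks := hand.filter (fun t => PySem.Set.contains kokushiRequired t) with hpicks
  have hnd1 : (PySem.Set.ofList picks).Nodup := PySem.Set.nodup_ofList picks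
  have hndreq : kokushiRequiredTuple.Nodup := by decide
  have hnd2 : (kokushiRequiredTuple.filter (fun t => decide (1 ≤ PySem.List.count hand t))).Nodup :=
    hndreq.filter _
  rw [List.countP_eq_length_filter, ← List.toFinset_card_of_nodup hnd1,
      ← List.toFinset_card_of_nodup hnd2]
  congr 1
  ext t
  simp only [List.mem_toFinset, PySem.Set.mem_ofList, hpicks, List.mem_filter,
    decide_eq_true_iff, PySem.List.count_eq]
  constructor
  · rintro ⟨hmem, hc⟩
    refine ⟨(contains_required_iff t).mp hc, ?_⟩
    have := List.count_pos_iff.mpr hmem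
    omega
  · rintro ⟨hreq, hc⟩
    have hpos : 0 < List.count t hand := by
      by_contra h
      simp only [Nat.not_lt, Nat.le_zero] at h
      rw [h] at hc; norm_num at hc
    exact ⟨List.count_pos_iff.mp hpos, (contains_required_iff t).mpr hreq⟩

-- the pair flags agree: a duplicated required tile in the hand vs over the required tuple
theorem pair_any_eq (hand : List String) :
    (hand.filter (fun t => PySem.Set.contains kokushiRequired t)).any
        (fun t => decide (2 ≤ PySem.List.count hand t))
      = kokushiRequiredTuple.any (fun t => decide (2 ≤ PySem.List.count hand t)) := by
  rw [Bool.eq_iff_iff]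
  simp only [List.any_eq_true, List.mem_filter, decide_eq_true_iff, PySem.List.count_eq]
  constructor
  · rintro ⟨t, ⟨_, hreq⟩, hc⟩
    exact ⟨t, (contains_required_iff t).mp hreq, hc⟩
  · rintro ⟨t, hreq, hc⟩
    have hpos : 0 < List.count t hand := by omega
    exact ⟨t, ⟨List.count_pos_iff.mp hpos, (contains_required_iff t).mpr hreq⟩, hc⟩

-- ===== VERDICT (by name: the statement is the Claim_ definition above) =====
theorem calculate_kokushi_shanten_spec : Claim_equal_calculate_kokushi_shanten := by
  intro hand _
  unfold Spec_calculate_kokushi_shanten calculate_kokushi_shanten calculate_kokushi_shanten_alt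
  simp only [← List.foldl_filter]
  rw [PySem.List.foldl_prod_mk
      (fun (s : PySem.Set String) (y : String) => PySem.Set.add s y)
      (fun (b : Bool) (y : String) => b || decide (2 ≤ PySem.List.count hand y))]
  rw [alt_fold_char]
  rw [show List.foldl PySem.Set.add PySem.Set.empty
        (List.filter (fun t => PySem.Set.contains kokushiRequired t) hand)
      = PySem.Set.ofList (List.filter (fun t => PySem.Set.contains kokushiRequired t) hand) from
    (PySem.Set.ofList_eq_foldl _).symm]
  rw [foldl_or_eq_any, Bool.false_or, pair_any_eq hand]
  have hlen := len_ofList_picks hand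
  simp only [PySem.Set.len, hlen]
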